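-- pv_equiv track=rewrite | github.com/BrianOldenzeel/py | pgrm2opdrachtweek2.py | keepvwl
-- ===== SOURCE A (Python) =====
-- def keepvwl(s):
--     """Geef ALLEEN de klinkers in s terug
--     """
--     if s == "":
--         return ""
--     elif s[0] in "aeiou":
--         vwl = ""
--         return s[0] + keepvwl(s[1:])
--     else:
--         return keepvwl(s[1:])
-- ===== SOURCE B (Python) =====
-- def keepvwl(s):
--     """Geef ALLEEN de klinkers in s terug"""
--     result = ""
--     for c in s:
--         if c in "aeiou":
--             result += c
--     return result
-- ===== Notes on version B (the rewrite author's own statement) =====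
-- stated objective: faster
-- what changed: Replaced the slice-based recursion (each call copies s[1:]) with a single iterative pass accumulating vowels into a result string.
import Mathlib
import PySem

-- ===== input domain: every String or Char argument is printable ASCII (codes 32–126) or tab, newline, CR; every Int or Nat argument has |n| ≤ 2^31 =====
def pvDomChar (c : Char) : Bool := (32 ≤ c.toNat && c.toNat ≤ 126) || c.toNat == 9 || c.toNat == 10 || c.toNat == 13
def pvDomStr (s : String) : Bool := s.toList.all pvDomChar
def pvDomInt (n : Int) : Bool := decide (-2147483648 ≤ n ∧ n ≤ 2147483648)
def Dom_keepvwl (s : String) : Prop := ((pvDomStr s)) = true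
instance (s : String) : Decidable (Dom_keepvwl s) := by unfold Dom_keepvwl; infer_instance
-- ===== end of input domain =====

-- B replaces A's slice-based recursion with a single accumulator loop (simpler, one pass).


-- ===== PORT A =====
-- Port of A: structural recursion on the characters (s[0] / s[1:] becomes head / tail).
def keepvwlA : List Char → List Char
  | [] => []
  | c :: rest =>
    if ['a','e','i','o','u'].contains c then c :: keepvwlA rest
    else keepvwlA rest

def keepvwl (s : String) : String := String.ofList (keepvwlA s.toList)

-- ===== PORT B =====
-- Port of B: iterative accumulator loop (result += c) as a foldl over the characters.
def keepvwl_alt (s : String) : String :=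
  String.ofList (s.toList.foldl (fun acc c =>
    if ['a','e','i','o','u'].contains c then acc ++ [c] else acc) [])

-- ===== PRECONDITION & SPEC =====
def Spec_keepvwl (s : String) (out : String) : Prop := out = keepvwl_alt s
instance (s : String) (out : String) : Decidable (Spec_keepvwl s out) := by unfold Spec_keepvwl; infer_instance

-- ===== CLAIM (what is proved, stated in full; the proofs are below) =====
def Claim_equal_keepvwl : Prop := ∀ (s : String), Dom_keepvwl s → Spec_keepvwl s (keepvwl s)

-- ===== LEMMAS AND PROOFS =====

-- ===== VERDICT (by name: the statement is the Claim_ definition above) =====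
theorem keepvwl_foldl (l : List Char) (acc : List Char) :
    l.foldl (fun acc c =>
      if ['a','e','i','o','u'].contains c then acc ++ [c] else acc) acc
      = acc ++ keepvwlA l := by
  induction l generalizing acc with
  | nil => simp [keepvwlA]
  | cons c rest ih =>
    simp only [List.foldl, keepvwlA]
    split <;> rw [ih] <;> simp

theorem keepvwl_spec : Claim_equal_keepvwl := by
  intro s _
  unfold Spec_keepvwl keepvwl keepvwl_alt
  rw [keepvwl_foldl]
  simp
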